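-- pv_equiv track=rewrite | github.com/MrBrantCode/unitest_baseline | mut_generate/mist_train_cf/cf_79340/solution.py | has_common_prime
-- ===== SOURCE A (Python) =====
-- def has_common_prime(arr1, arr2):
--     def is_prime(n):
--         if n <= 1:
--             return False
--         elif n == 2:
--             return True
--         elif n % 2 == 0:
--             return False
--         for i in range(3, int(n**0.5)+1, 2):
--             if n % i == 0:
--                 return False
--         return True
--
--     primes1 = {x for x in arr1 if is_prime(x)}
--     primes2 = {x for x in arr2 if is_prime(x)}
--
--     return not primes1.isdisjoint(primes2)
-- ===== SOURCE B (Python) =====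
-- def has_common_prime(arr1, arr2):
--     def is_prime(n):
--         if n <= 1:
--             return False
--         elif n == 2:
--             return True
--         elif n % 2 == 0:
--             return False
--         for i in range(3, int(n**0.5)+1, 2):
--             if n % i == 0:
--                 return False
--         return True
--
--     common = set(arr1) & set(arr2)
--     return any(is_prime(x) for x in common)
-- ===== Notes on version B (the rewrite author's own statement) =====
-- stated objective: alternative
-- what changed: B intersects the raw value sets first and runs the primality test only over the common values with short-circuit any(), instead of A's filtering both arrays to prime sets and testing disjointness.
import Mathlib
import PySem

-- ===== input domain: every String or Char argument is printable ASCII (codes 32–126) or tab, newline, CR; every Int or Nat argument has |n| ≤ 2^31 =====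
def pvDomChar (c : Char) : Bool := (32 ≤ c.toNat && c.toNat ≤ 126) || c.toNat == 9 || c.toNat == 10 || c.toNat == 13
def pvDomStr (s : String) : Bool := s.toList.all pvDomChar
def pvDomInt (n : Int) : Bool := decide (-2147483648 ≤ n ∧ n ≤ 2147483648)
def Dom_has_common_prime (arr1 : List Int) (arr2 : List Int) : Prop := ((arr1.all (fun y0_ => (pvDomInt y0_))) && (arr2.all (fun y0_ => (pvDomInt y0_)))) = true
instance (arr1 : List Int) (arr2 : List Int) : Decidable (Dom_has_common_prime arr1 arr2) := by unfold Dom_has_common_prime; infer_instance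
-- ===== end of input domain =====

-- B intersects the raw value sets first and tests primality only on the common values (short-circuit any);
-- A filters both arrays to prime sets and tests disjointness. Same results; objective: alternative decomposition.

-- ===== PORT A =====
-- is_prime, shared verbatim by both Pythons. int(n**0.5) is ported as Nat.sqrt n.toNat:
-- exact for the reachable 3 ≤ n ≤ 2^31 (double sqrt is correctly rounded there, so int() of it is the integer sqrt).
def pvIsPrime (n : Int) : Bool :=
  if n ≤ 1 then false
  else if n == 2 then true
  else if PySem.Int.mod n 2 == 0 then false
  else (PySem.List.pyRange 3 ((Nat.sqrt n.toNat : Int) + 1) 2).all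
    (fun i => !(PySem.Int.mod n i == 0))

def has_common_prime (arr1 : List Int) (arr2 : List Int) : Bool :=
  let primes1 : PySem.Set Int := PySem.Set.ofList (arr1.filter (fun x => pvIsPrime x))
  let primes2 : PySem.Set Int := PySem.Set.ofList (arr2.filter (fun x => pvIsPrime x))
  !(PySem.Set.isdisjoint primes1 primes2)

-- ===== PORT B =====
def has_common_prime_alt (arr1 : List Int) (arr2 : List Int) : Bool :=
  let common : PySem.Set Int := PySem.Set.inter (PySem.Set.ofList arr1) (PySem.Set.ofList arr2)
  common.any (fun x => pvIsPrime x)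

-- ===== PRECONDITION & SPEC =====
def Spec_has_common_prime (arr1 : List Int) (arr2 : List Int) (out : Bool) : Prop := out = has_common_prime_alt arr1 arr2
instance (arr1 : List Int) (arr2 : List Int) (out : Bool) : Decidable (Spec_has_common_prime arr1 arr2 out) := by unfold Spec_has_common_prime; infer_instance

-- ===== CLAIM (what is proved, stated in full; the proofs are below) =====
def Claim_equal_has_common_prime : Prop := ∀ (arr1 : List Int) (arr2 : List Int), Dom_has_common_prime arr1 arr2 → Spec_has_common_prime arr1 arr2 (has_common_prime arr1 arr2)

-- ===== LEMMAS AND PROOFS =====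

-- Both sides are true exactly when some value in both arrays is prime.
theorem pv_main (arr1 arr2 : List Int) :
    has_common_prime arr1 arr2 = has_common_prime_alt arr1 arr2 := by
  unfold has_common_prime has_common_prime_alt
  rw [Bool.eq_iff_iff]
  simp only [Bool.not_eq_eq_eq_not, Bool.not_true,
    ← Bool.not_eq_true, PySem.Set.isdisjoint_iff, PySem.Set.mem_ofList,
    List.mem_filter, List.any_eq_true, PySem.Set.mem_inter]
  constructor
  · intro h
    push Not at h
    obtain ⟨x, ⟨hx1, hp⟩, hx2, -⟩ := h
    exact ⟨x, ⟨hx1, hx2⟩, hp⟩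
  · intro ⟨x, ⟨hx1, hx2⟩, hp⟩ h
    exact (h x ⟨hx1, hp⟩) ⟨hx2, hp⟩

-- ===== VERDICT (by name: the statement is the Claim_ definition above) =====
theorem has_common_prime_spec : Claim_equal_has_common_prime := by
  intro arr1 arr2 _
  unfold Spec_has_common_prime
  exact pv_main arr1 arr2
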